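-- pv_equiv track=rewrite | github.com/Bloomerp-io/Bloomerp | bloomerp/django_bloomerp/bloomerp/components/global_search.py | _split_query_and_suffix
-- ===== SOURCE A (Python) =====
-- def _split_query_and_suffix(value: str) -> tuple[str, str]:
--     value = value.strip()
--     if not value:
--         return "", ""
--
--     question_idx = value.find("?")
--     hash_idx = value.find("#")
--     candidates = [idx for idx in [question_idx, hash_idx] if idx != -1]
--     if not candidates:
--         return value.strip(), ""
--
--     split_idx = min(candidates)
--     return value[:split_idx].strip(), value[split_idx:].strip()
-- ===== SOURCE B (Python) =====
-- def _split_query_and_suffix(value: str) -> tuple[str, str]: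
--     value = value.strip()
--     if not value:
--         return "", ""
--     for i, ch in enumerate(value):
--         if ch in "?#":
--             return value[:i].strip(), value[i:].strip()
--     return value, ""
-- ===== Notes on version B (the rewrite author's own statement) =====
-- stated objective: simpler
-- what changed: Replaced the two full find() scans plus candidate-list filtering and min() with a single short-circuiting enumerate loop that stops at the first '?' or '#', and dropped the redundant re-strip in the no-separator branch.
import Mathlib
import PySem

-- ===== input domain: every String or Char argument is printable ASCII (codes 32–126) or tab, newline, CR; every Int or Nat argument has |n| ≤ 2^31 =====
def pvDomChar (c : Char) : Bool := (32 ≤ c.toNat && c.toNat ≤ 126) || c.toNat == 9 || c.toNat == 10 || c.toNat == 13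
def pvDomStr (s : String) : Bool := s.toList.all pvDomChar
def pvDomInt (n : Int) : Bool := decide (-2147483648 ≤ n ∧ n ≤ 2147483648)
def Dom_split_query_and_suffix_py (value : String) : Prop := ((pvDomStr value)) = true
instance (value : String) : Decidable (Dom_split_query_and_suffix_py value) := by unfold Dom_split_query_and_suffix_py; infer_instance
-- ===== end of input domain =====

-- B replaces A's two full find() scans + candidate list + min with one short-circuiting
-- loop stopping at the first '?' or '#' (objective: simpler).

-- ===== PORT A =====
def split_query_and_suffix_py (value : String) : String × String :=
  let v := PySem.Str.strip value
  if PySem.Str.len v = 0 then ("", "")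
  else
    let question_idx := PySem.Str.find v "?"
    let hash_idx := PySem.Str.find v "#"
    let candidates := ([question_idx, hash_idx]).filter (fun idx => idx != -1)
    if candidates.isEmpty then (PySem.Str.strip v, "")
    else
      -- candidates is nonempty here, so min? is some and getD's default is never used
      let split_idx := (PySem.List.min? candidates (fun x => x)).getD 0
      (PySem.Str.strip (PySem.Str.slice v none (some split_idx)),
       PySem.Str.strip (PySem.Str.slice v (some split_idx) none))

-- ===== PORT B =====
-- the enumerate loop of Source B: first index whose char is '?' or '#'
def altGo : List Char → Nat → Option Nat
  | [], _ => none
  | c :: rest, i => if c = '?' ∨ c = '#' then some i else altGo rest (i + 1)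

def split_query_and_suffix_py_alt (value : String) : String × String :=
  let v := PySem.Str.strip value
  if PySem.Str.len v = 0 then ("", "")
  else
    match altGo v.toList 0 with
    | some i =>
      (PySem.Str.strip (PySem.Str.slice v none (some (i : Int))),
       PySem.Str.strip (PySem.Str.slice v (some (i : Int)) none))
    | none => (v, "")

-- ===== PRECONDITION & SPEC =====
def Spec_split_query_and_suffix_py (value : String) (out : String × String) : Prop := out = split_query_and_suffix_py_alt value
instance (value : String) (out : String × String) : Decidable (Spec_split_query_and_suffix_py value out) := by unfold Spec_split_query_and_suffix_py; infer_instance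

-- ===== CLAIM (what is proved, stated in full; the proofs are below) =====
def Claim_equal_split_query_and_suffix_py : Prop := ∀ (value : String), Dom_split_query_and_suffix_py value → Spec_split_query_and_suffix_py value (split_query_and_suffix_py value)

-- ===== LEMMAS AND PROOFS =====

-- A's selector, in a four-way normal form (proof-side helper only)
def pSel (l : List Char) : Option Int :=
  let q := PySem.Chars.find l ['?']
  let h := PySem.Chars.find l ['#']
  if q = -1 then (if h = -1 then none else some h)
  else if h = -1 then some q else some (min q h)

lemma find_go_succ (sub l : List Char) (k : Nat) :
    PySem.Chars.find.go sub l (k + 1)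
      = if PySem.Chars.find.go sub l k = -1 then -1 else PySem.Chars.find.go sub l k + 1 := by
  induction l generalizing k with
  | nil =>
    by_cases he : sub.isEmpty <;> simp [PySem.Chars.find.go, he]
  | cons c rest ih =>
    by_cases h : sub.isPrefixOf (c :: rest) = true
    · simp only [PySem.Chars.find.go, h, if_true]
      split_ifs <;> omega
    · simp only [PySem.Chars.find.go, h]
      exact ih (k + 1)

lemma find_cons (c : Char) (l : List Char) (q : Char) :
    PySem.Chars.find (c :: l) [q]
      = if c = q then 0
        else if PySem.Chars.find l [q] = -1 then -1 else PySem.Chars.find l [q] + 1 := by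
  simp only [PySem.Chars.find, PySem.Chars.find.go]
  have hpre : [q].isPrefixOf (c :: l) = (q == c) := by simp [List.isPrefixOf]
  rw [hpre]
  by_cases h : c = q
  · simp [h]
  · have hq : (q == c) = false := by simp [Ne.symm h]
    rw [hq]
    simp only [Bool.false_eq_true, if_false, h]
    rw [show (1 : Nat) = 0 + 1 from rfl, find_go_succ]

lemma altGo_succ (l : List Char) (k : Nat) :
    altGo l (k + 1) = (altGo l k).map (· + 1) := by
  induction l generalizing k with
  | nil => simp [altGo]
  | cons c rest ih =>
    simp only [altGo]
    split_ifs with h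
    · simp
    · exact ih (k + 1)

lemma cands_eq (q h : Int) :
    (if (([q, h]).filter (fun idx => idx != -1)).isEmpty then none
     else PySem.List.min? (([q, h]).filter (fun idx => idx != -1)) (fun x => x))
      = if q = -1 then (if h = -1 then none else some h)
        else if h = -1 then some q else some (min q h) := by
  by_cases h1 : q = -1 <;> by_cases h2 : h = -1
  · simp [h1, h2, List.filter]
  · have e2 : (h != -1) = true := by simp [h2]
    simp [h1, h2, e2, PySem.List.min?, List.filter]
  · have e1 : (q != -1) = true := by simp [h1]
    simp [h1, h2, e1, PySem.List.min?, List.filter]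
  · have e1 : (q != -1) = true := by simp [h1]
    have e2 : (h != -1) = true := by simp [h2]
    simp only [e1, e2, List.filter, List.isEmpty_cons, Bool.false_eq_true, if_false,
      PySem.List.min?, List.foldl, h1, h2, min_def]
    split_ifs <;> first | rfl | (simp only [Option.some.injEq]; omega)

lemma min?_some {α κ : Type} [LT κ] [DecidableLT κ] (x : α) (xs : List α) (key : α → κ) :
    ∃ y, PySem.List.min? (x :: xs) key = some y := by
  suffices h : ∀ (l : List α) (m : α), ∃ y,
      (l.foldl (fun acc x => match acc with
        | none => some x
        | some m => if key x < key m then some x else some m) (some m)) = some y by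
    simpa [PySem.List.min?] using h xs x
  intro l
  induction l with
  | nil => intro m; exact ⟨m, rfl⟩
  | cons a rest ih =>
    intro m
    simp only [List.foldl]
    split_ifs <;> apply ih

lemma pSel_eq (l : List Char) :
    pSel l = (altGo l 0).map (fun i => ((i : Nat) : Int)) := by
  induction l with
  | nil => simp [pSel, PySem.Chars.find, PySem.Chars.find.go, altGo]
  | cons c rest ih =>
    by_cases hq : c = '?'
    · have hh : ¬ c = '#' := by simp [hq]
      simp only [pSel, find_cons, hq, if_true, hh, if_false]
      have h1 : ¬ (0 : Int) = -1 := by decide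
      simp only [h1, if_false]
      by_cases h0 : PySem.Chars.find rest ['#'] = -1
      · simp [h0, altGo, hq]
      · have hge : -1 ≤ PySem.Chars.find rest ['#'] := PySem.Chars.neg_one_le_find rest ['#']
        have : ¬ PySem.Chars.find rest ['#'] + 1 = -1 := by omega
        simp only [h0, if_false, this]
        have : min (0 : Int) (PySem.Chars.find rest ['#'] + 1) = 0 := by omega
        simp [this, altGo, hq]
    · by_cases hh : c = '#'
      · simp only [pSel, find_cons, hq, if_false, hh, if_true]
        have h1 : ¬ (0 : Int) = -1 := by decide
        simp only [h1, if_false]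
        by_cases h0 : PySem.Chars.find rest ['?'] = -1
        · simp [h0, altGo, hh]
        · have hge : -1 ≤ PySem.Chars.find rest ['?'] := PySem.Chars.neg_one_le_find rest ['?']
          have h2 : ¬ PySem.Chars.find rest ['?'] + 1 = -1 := by omega
          have h3 : min (PySem.Chars.find rest ['?'] + 1) (0 : Int) = 0 := by omega
          simp [h0, h2, h3, altGo, hh]
      · -- no separator at the head: both sides shift by one
        have hsep : ¬ (c = '?' ∨ c = '#') := by tauto
        have hstep : pSel (c :: rest) = (pSel rest).map (· + 1) := by
          have hgq := PySem.Chars.neg_one_le_find rest ['?']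
          have hgh := PySem.Chars.neg_one_le_find rest ['#']
          by_cases h1 : PySem.Chars.find rest ['?'] = -1
          · by_cases h2 : PySem.Chars.find rest ['#'] = -1
            · simp [pSel, find_cons, hq, hh, h1, h2]
            · have e2 : ¬ PySem.Chars.find rest ['#'] + 1 = -1 := by omega
              simp [pSel, find_cons, hq, hh, h1, h2, e2]
          · by_cases h2 : PySem.Chars.find rest ['#'] = -1
            · have e1 : ¬ PySem.Chars.find rest ['?'] + 1 = -1 := by omega
              simp [pSel, find_cons, hq, hh, h1, h2, e1]
            · have e1 : ¬ PySem.Chars.find rest ['?'] + 1 = -1 := by omega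
              have e2 : ¬ PySem.Chars.find rest ['#'] + 1 = -1 := by omega
              have e5 : min (PySem.Chars.find rest ['?'] + 1) (PySem.Chars.find rest ['#'] + 1)
                  = min (PySem.Chars.find rest ['?']) (PySem.Chars.find rest ['#']) + 1 := by omega
              simp [pSel, find_cons, hq, hh, h1, h2, e1, e2, e5]
        rw [hstep, ih]
        simp only [altGo, hsep, if_false]
        rw [show (1 : Nat) = 0 + 1 from rfl, altGo_succ]
        cases altGo rest 0 <;> simp

lemma dropWhile_idem {α : Type} (p : α → Bool) (l : List α) :
    List.dropWhile p (List.dropWhile p l) = List.dropWhile p l := by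
  induction l with
  | nil => simp
  | cons c t ih =>
    by_cases h : p c = true
    · simp [List.dropWhile_cons, h, ih]
    · simp [List.dropWhile_cons, h]

lemma lstrip_rstrip (m : List Char)
    (hm : PySem.Chars.lstrip m = m) :
    PySem.Chars.lstrip (PySem.Chars.rstrip m) = PySem.Chars.rstrip m := by
  have hpre : PySem.Chars.rstrip m <+: m := by
    have := List.dropWhile_suffix (l := m.reverse) PySem.Chars.isspace
    simpa [PySem.Chars.rstrip, List.reverse_prefix] using
      (List.reverse_prefix.mpr this)
  rcases hr : PySem.Chars.rstrip m with _ | ⟨a, t⟩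
  · simp [PySem.Chars.lstrip]
  · rw [hr] at hpre
    obtain ⟨s, hs⟩ := hpre
    have hm' : m = a :: (t ++ s) := by rw [← hs]; simp
    have hpa : PySem.Chars.isspace a = false := by
      by_contra hcontra
      have hpa' : PySem.Chars.isspace a = true := by
        cases hx : PySem.Chars.isspace a
        · exact absurd hx hcontra
        · rfl
      rw [hm'] at hm
      simp only [PySem.Chars.lstrip, List.dropWhile_cons, hpa', if_true] at hm
      have hle := List.length_dropWhile_le PySem.Chars.isspace (t ++ s)
      have hlen := congrArg List.length hm
      rw [List.length_cons] at hlen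
      omega
    simp [PySem.Chars.lstrip, List.dropWhile_cons, hpa]

lemma strip_idem (l : List Char) :
    PySem.Chars.strip (PySem.Chars.strip l) = PySem.Chars.strip l := by
  have h1 : PySem.Chars.lstrip (PySem.Chars.lstrip l) = PySem.Chars.lstrip l := by
    simp [PySem.Chars.lstrip, dropWhile_idem]
  have h2 : PySem.Chars.lstrip (PySem.Chars.rstrip (PySem.Chars.lstrip l))
      = PySem.Chars.rstrip (PySem.Chars.lstrip l) := lstrip_rstrip _ h1
  simp only [PySem.Chars.strip, h2]
  simp [PySem.Chars.rstrip, dropWhile_idem]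

lemma str_strip_idem (s : String) :
    PySem.Str.strip (PySem.Str.strip s) = PySem.Str.strip s := by
  simp [PySem.Str.strip, strip_idem]

lemma str_find_q (v : String) : PySem.Str.find v "?" = PySem.Chars.find v.toList ['?'] := by
  have : ("?" : String).toList = ['?'] := by decide
  simp [PySem.Str.find, this]

lemma str_find_h (v : String) : PySem.Str.find v "#" = PySem.Chars.find v.toList ['#'] := by
  have : ("#" : String).toList = ['#'] := by decide
  simp [PySem.Str.find, this]

-- ===== VERDICT (by name: the statement is the Claim_ definition above) =====
theorem split_query_and_suffix_py_spec : Claim_equal_split_query_and_suffix_py := by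
  intro value _
  unfold Spec_split_query_and_suffix_py split_query_and_suffix_py split_query_and_suffix_py_alt
  set v := PySem.Str.strip value with hv
  by_cases hlen : PySem.Str.len v = 0
  · have h0 : v.toList = [] := by
      rw [PySem.Str.len_eq v] at hlen
      exact List.length_eq_zero_iff.mp (by exact_mod_cast hlen)
    have hv0 : v = "" := by simpa using congrArg String.ofList h0
    simp [hv0]
  · simp only [hlen, if_false, str_find_q, str_find_h]
    have hkey := cands_eq (PySem.Chars.find v.toList ['?']) (PySem.Chars.find v.toList ['#'])
    have hsel : (if (([PySem.Chars.find v.toList ['?'], PySem.Chars.find v.toList ['#']]).filter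
          (fun idx => idx != -1)).isEmpty then none
        else PySem.List.min? (([PySem.Chars.find v.toList ['?'],
          PySem.Chars.find v.toList ['#']]).filter (fun idx => idx != -1)) (fun x => x))
        = (altGo v.toList 0).map (fun i => ((i : Nat) : Int)) := by
      rw [hkey]
      have := pSel_eq v.toList
      simpa [pSel] using this
    rcases hB : altGo v.toList 0 with _ | i
    · rw [hB] at hsel
      simp only [Option.map_none] at hsel
      by_cases hE : (([PySem.Chars.find v.toList ['?'], PySem.Chars.find v.toList ['#']]).filter
          (fun idx => idx != -1)).isEmpty
      · simp only [hE, if_true]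
        rw [hv, str_strip_idem]
      · rw [if_neg hE] at hsel
        rcases hne : ([PySem.Chars.find v.toList ['?'], PySem.Chars.find v.toList ['#']]).filter
            (fun idx => idx != -1) with _ | ⟨x, xs⟩
        · rw [hne] at hE; simp at hE
        · rw [hne] at hsel
          obtain ⟨y, hy⟩ := min?_some x xs (fun x => x)
          rw [hy] at hsel
          exact absurd hsel (by simp)
    · rw [hB] at hsel
      simp only [Option.map_some] at hsel
      by_cases hE : (([PySem.Chars.find v.toList ['?'], PySem.Chars.find v.toList ['#']]).filter
          (fun idx => idx != -1)).isEmpty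
      · rw [if_pos hE] at hsel; exact absurd hsel (by simp)
      · rw [if_neg hE] at hsel
        simp only [hE, Bool.false_eq_true, if_false, hsel, Option.getD_some]
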